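-- pv_equiv track=rewrite | github.com/alchrist42/adventofcode_2023 | 15.py | solve
-- ===== SOURCE A (Python) =====
-- def solve(data: list[str]):
--     res = 0
--
--
--     def my_hash(s):
--         ans = 0
--         for ch in s:
--             ans += ord(ch)
--             ans *= 17
--             ans %= 256
--         return ans
--
--     hashes = data[0].split(",")
--     for h in hashes:
--         lres = my_hash(h)
--         res += lres
--
--     return res
-- ===== SOURCE B (Python) =====
-- def solve(data: list[str]):
--     total = 0
--     for seg in data[0].split(","):
--         # closed-form hash: sum of ord(ch) * 17**(distance from end + 1), one mod at the end
--         acc = 0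
--         m = 17
--         for ch in reversed(seg):
--             acc += ord(ch) * m
--             m *= 17
--         total += acc % 256
--     return total
-- ===== Notes on version B (the rewrite author's own statement) =====
-- stated objective: alternative
-- what changed: Replaces the stateful per-character Horner fold ((h+ord)*17 mod 256 at every step) by a closed-form polynomial evaluation: each segment is scanned back-to-front accumulating ord(ch) times a growing power-of-17 weight, with a single mod 256 at the end.
-- outside the precondition, e.g. on solve([]): A raises IndexError, B raises IndexError
import Mathlib
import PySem

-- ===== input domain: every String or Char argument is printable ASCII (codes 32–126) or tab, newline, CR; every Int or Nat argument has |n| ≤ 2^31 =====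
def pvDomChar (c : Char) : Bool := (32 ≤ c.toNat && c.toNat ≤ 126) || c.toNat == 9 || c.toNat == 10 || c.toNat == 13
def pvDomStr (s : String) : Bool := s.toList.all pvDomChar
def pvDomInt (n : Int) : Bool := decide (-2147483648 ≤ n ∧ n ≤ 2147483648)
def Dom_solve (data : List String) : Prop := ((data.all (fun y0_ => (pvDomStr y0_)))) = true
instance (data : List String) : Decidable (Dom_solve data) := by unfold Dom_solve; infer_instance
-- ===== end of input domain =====

-- B replaces A's stateful per-character Horner fold (mod 256 at every step) by a
-- closed-form polynomial evaluation per segment: back-to-front weighted sum with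
-- powers of 17, one mod at the end (objective: alternative).

-- ===== PORT A =====
-- the per-character update 'ans += ord(ch); ans *= 17; ans %= 256'
def hstep (ans : Int) (ch : Char) : Int := PySem.Int.mod ((ans + (ch.toNat : Int)) * 17) 256

def myHash (s : List Char) : Int := s.foldl hstep 0

def solve (data : List String) : Int :=
  match PySem.List.pyGet? data 0 with
  | none => 0  -- data[0] raises IndexError; excluded by Pre_solve
  | some s =>
    let hashes := PySem.Chars.splitOn s.toList [',']
    hashes.foldl (fun res h => res + myHash h) 0

-- ===== PORT B =====
-- 'acc = 0; m = 17; for ch in reversed(seg): acc += ord(ch)*m; m *= 17; hash = acc % 256'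
def segHash (s : List Char) : Int :=
  PySem.Int.mod
    (s.reverse.foldl
      (fun (st : Int × Int) ch => (st.1 + (ch.toNat : Int) * st.2, st.2 * 17)) (0, 17)).1
    256

def solve_alt (data : List String) : Int :=
  match PySem.List.pyGet? data 0 with
  | none => 0  -- data[0] raises IndexError; excluded by Pre_solve
  | some s =>
    (PySem.Chars.splitOn s.toList [',']).foldl (fun total seg => total + segHash seg) 0

-- ===== PRECONDITION & SPEC =====
-- Pre_ excludes only the empty list, on which A (and B) raise IndexError at data[0].
def Pre_solve (data : List String) : Prop := data ≠ []
instance (data : List String) : Decidable (Pre_solve data) := by unfold Pre_solve; infer_instance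
def pvWitness_solve : List String := ["ab,c,,x"]

def Spec_solve (data : List String) (out : Int) : Prop := out = solve_alt data
instance (data : List String) (out : Int) : Decidable (Spec_solve data out) := by unfold Spec_solve; infer_instance

-- ===== CLAIM (what is proved, stated in full; the proofs are below) =====
def Claim_equal_solve : Prop := ∀ (data : List String), Dom_solve data → Pre_solve data → Spec_solve data (solve data)

-- ===== LEMMAS AND PROOFS =====

-- A's fold without the per-step mod
def raw (a : Int) (c : Char) : Int := (a + (c.toNat : Int)) * 17

theorem mod_eq_emod (a : Int) : PySem.Int.mod a 256 = a % 256 :=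
  PySem.Int.mod_eq_emod_of_pos (by norm_num)

-- A's per-step-mod fold equals the mod-free fold with one mod at the end
theorem foldl_hstep_eq (cs : List Char) (h : Int) :
    cs.foldl hstep (h % 256) = (cs.foldl raw h) % 256 := by
  induction cs generalizing h with
  | nil => simp
  | cons c rest ih =>
    simp only [List.foldl_cons, hstep, mod_eq_emod]
    have hc : ((h % 256 + (c.toNat : Int)) * 17) % 256 = ((h + (c.toNat : Int)) * 17) % 256 := by
      omega
    rw [hc]
    have := ih ((h + (c.toNat : Int)) * 17)
    simpa [raw] using this

-- shift lemma for the mod-free fold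
theorem foldl_raw_shift (cs : List Char) (h : Int) :
    cs.foldl raw h = h * 17 ^ cs.length + cs.foldl raw 0 := by
  induction cs generalizing h with
  | nil => simp
  | cons c rest ih =>
    simp only [List.foldl_cons, List.length_cons]
    rw [ih (raw h c), ih (raw 0 c)]
    simp only [raw]
    ring

-- B's reversed weighted-sum fold computes exactly the mod-free fold (and the next weight)
theorem rev_fold_eq (cs : List Char) :
    cs.reverse.foldl
      (fun (st : Int × Int) ch => (st.1 + (ch.toNat : Int) * st.2, st.2 * 17)) (0, 17)
    = (cs.foldl raw 0, 17 ^ (cs.length + 1)) := by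
  induction cs with
  | nil => simp
  | cons c rest ih =>
    simp only [List.reverse_cons, List.foldl_append, ih, List.foldl_cons, List.foldl_nil,
      List.length_cons]
    rw [show List.foldl raw (raw 0 c) rest = (raw 0 c) * 17 ^ rest.length + rest.foldl raw 0
        from foldl_raw_shift rest (raw 0 c)]
    simp only [raw, Prod.mk.injEq]
    constructor
    · ring
    · ring

theorem segHash_eq_myHash (s : List Char) : myHash s = segHash s := by
  unfold myHash segHash
  rw [rev_fold_eq, mod_eq_emod]
  have := foldl_hstep_eq s 0
  simpa using this

-- ===== VERDICT (by name: the statement is the Claim_ definition above) =====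
theorem solve_spec : Claim_equal_solve := by
  intro data _ hpre
  unfold Spec_solve solve solve_alt
  have hfun : myHash = segHash := funext segHash_eq_myHash
  rw [hfun]
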